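-- pv_equiv track=rewrite | github.com/USG-22-23-IBCS/EminentPriority | LoopListPracticeYuliia.py | Exclude23
-- ===== SOURCE A (Python) =====
-- def Exclude23(l):
--     total = 0
--     found2 = False
--     for elem in l:
--         if elem == 2:
--             found2 = True
--
--         if found2 == False:
--             total = total + elem
--
--         if found2 == True:
--             if elem == 3:
--                 found2 = False
--
-- #creating the boolean value would be the best option for this kind of question
--             '''if elem == 3:
--                 break
--         total = total + elem
--         if elem == 2:
--         repeat until (elem == 3):
--             total = total + 0'''
--     return total
-- ===== SOURCE B (Python) =====
-- def Exclude23(l):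
--     l = list(l)
--     total = 0
--     i = 0
--     n = len(l)
--     while i < n:
--         if l[i] != 2:
--             total += l[i]
--             i += 1
--         else:
--             try:
--                 j = l.index(3, i + 1)
--             except ValueError:
--                 break
--             i = j + 1
--     return total
-- ===== Notes on version B (the rewrite author's own statement) =====
-- stated objective: alternative
-- what changed: Replaces A's per-element found2 flag scan with an index-driven scan that, upon seeing a 2, uses list.index(3, i+1) to jump directly past the matching 3 (stopping if none exists).
import Mathlib
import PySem

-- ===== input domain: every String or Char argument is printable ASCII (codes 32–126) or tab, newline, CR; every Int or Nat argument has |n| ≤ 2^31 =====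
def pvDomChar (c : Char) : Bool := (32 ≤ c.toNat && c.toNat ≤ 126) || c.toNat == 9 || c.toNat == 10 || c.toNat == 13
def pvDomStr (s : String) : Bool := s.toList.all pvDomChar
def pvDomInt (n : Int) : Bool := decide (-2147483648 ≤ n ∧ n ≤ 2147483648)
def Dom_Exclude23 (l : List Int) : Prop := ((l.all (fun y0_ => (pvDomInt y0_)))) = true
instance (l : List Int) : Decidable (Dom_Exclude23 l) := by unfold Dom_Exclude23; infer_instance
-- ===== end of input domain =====

-- B replaces A's per-element found2 flag with an index?-based jump past each 2…3 span (alternative decomposition, same cost).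

-- ===== PORT A =====
-- one fold step of A's loop over state (total, found2)
def stepA (s : Int × Bool) (elem : Int) : Int × Bool :=
  let found2 := if elem == 2 then true else s.2
  let total := if found2 == false then s.1 + elem else s.1
  let found2 := if found2 == true && elem == 3 then false else found2
  (total, found2)

def Exclude23 (l : List Int) : Int :=
  (l.foldl stepA (0, false)).1

-- ===== PORT B =====
-- B's while loop over index i, phrased on the suffix l[i:]: on a 2, l.index(3, i+1)
-- becomes PySem.List.index? on the tail and the jump i := j+1 becomes drop (j+1).
def altGo (l : List Int) : Int :=
  match l with
  | [] => 0
  | x :: rest =>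
    if x ≠ 2 then x + altGo rest
    else
      match PySem.List.index? rest 3 with
      | none => 0
      | some j => altGo (rest.drop (j + 1))
termination_by l.length
decreasing_by
  · simp
  · simp only [List.length_cons]
    have := List.length_drop (l := rest) (i := j + 1)
    omega

def Exclude23_alt (l : List Int) : Int := altGo l

-- ===== PRECONDITION & SPEC =====
def Spec_Exclude23 (l : List Int) (out : Int) : Prop := out = Exclude23_alt l
instance (l : List Int) (out : Int) : Decidable (Spec_Exclude23 l out) := by unfold Spec_Exclude23; infer_instance

-- ===== CLAIM (what is proved, stated in full; the proofs are below) =====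
def Claim_equal_Exclude23 : Prop := ∀ (l : List Int), Dom_Exclude23 l → Spec_Exclude23 l (Exclude23 l)

-- ===== LEMMAS AND PROOFS =====

-- value of A's skipping phase: scanning with found2 = true adds nothing until the first 3,
-- which resets the flag; stated via index? on the rest of the list
theorem main_and_skip : ∀ (n : Nat) (l : List Int), l.length = n →
    (∀ t : Int, (l.foldl stepA (t, false)).1 = t + altGo l) ∧
    (∀ t : Int, (l.foldl stepA (t, true)).1 =
      match PySem.List.index? l 3 with
      | none => t
      | some j => t + altGo (l.drop (j + 1))) := by
  intro n
  induction n using Nat.strong_induction_on with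
  | _ n ih =>
    intro l hl
    constructor
    · intro t
      match l with
      | [] => simp [altGo]
      | x :: rest =>
        by_cases hx : x = 2
        · subst hx
          have hskip := (ih rest.length (by simp [← hl]) rest rfl).2
          simp only [List.foldl_cons, stepA]
          norm_num
          rw [hskip t]
          simp only [altGo, PySem.List.index?_eq_idxOf?]
          norm_num
          cases hidx : List.idxOf? 3 rest
          · simp
          · simp
        · have hmain := (ih rest.length (by simp [← hl]) rest rfl).1
          simp only [List.foldl_cons, stepA]
          have h2 : (x == 2) = false := by simp [hx]
          by_cases hx3 : x = 3
          · subst hx3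
            simp only [altGo]
            norm_num
            rw [hmain (t + 3)]
            ring
          · simp only [h2, altGo]
            norm_num [hx3, hx]
            rw [hmain (t + x)]
            ring
    · intro t
      match l with
      | [] => simp [PySem.List.index?]
      | x :: rest =>
        by_cases hx3 : x = 3
        · subst hx3
          have hmain := (ih rest.length (by simp [← hl]) rest rfl).1
          simp only [List.foldl_cons, stepA]
          norm_num
          rw [hmain t]
          simp only [List.idxOf?_cons]
          simp
        · have hskip := (ih rest.length (by simp [← hl]) rest rfl).2
          simp only [List.foldl_cons, stepA]
          norm_num [hx3]
          rw [hskip t]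
          simp only [PySem.List.index?_eq_idxOf?, List.idxOf?_cons]
          cases hidx : List.idxOf? 3 rest <;> simp [hx3]

-- ===== VERDICT (by name: the statement is the Claim_ definition above) =====
theorem Exclude23_spec : Claim_equal_Exclude23 := by
  intro l _
  unfold Spec_Exclude23 Exclude23 Exclude23_alt
  have := (main_and_skip l.length l rfl).1 0
  simpa using this
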